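-- pv_equiv track=rewrite | github.com/Opsimathy/IT5003 | Finals/CS2040S 25S1/CS2040S 25S1 Final Code.py | superstar
-- ===== SOURCE A (Python) =====
-- from typing import List, Optional, Tuple
--
-- def superstar(n: int, edges: List[Tuple[int, int]],
--               value: List[int], k: int) -> int:
--     from heapq import nlargest
--     g = [[] for _ in range(n)]
--     for u, v in edges:
--         if value[v] > 0:
--             g[u].append(value[v])
--         if value[u] > 0:
--             g[v].append(value[u])
--     return max(value[i] + sum(nlargest(k, g[i]))
--                for i in range(n))
--
-- edges = [(0, 1), (1, 2), (1, 3), (2, 4), (3, 4), (3, 5), (3, 6)]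
-- ===== SOURCE B (Python) =====
-- def superstar(n, edges, value, k):
--     # Online top-k: per node keep only the k largest positive neighbour
--     # values in a small ascending buffer, filled in a single edge pass.
--     top = [[] for _ in range(n)]
--     for u, v in edges:
--         for a, b in ((u, v), (v, u)):
--             w = value[b]
--             if w > 0 and k > 0:
--                 t = top[a]
--                 i = 0
--                 while i < len(t) and t[i] <= w:
--                     i += 1
--                 t.insert(i, w)
--                 if len(t) > k:
--                     t.pop(0)
--     best = None
--     for i in range(n):
--         s = value[i] + sum(top[i])
--         if best is None or s > best:
--             best = s
--     return best
-- ===== Notes on version B (the rewrite author's own statement) =====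
-- stated objective: alternative
-- what changed: Instead of collecting full per-node adjacency value lists and selecting the k largest of each with heapq.nlargest afterwards, B maintains per node only a size-capped ascending buffer of the k largest positive neighbour values online during a single pass over the edges, then takes a running maximum of value[i]+sum(buffer[i]); memory for the buffers is O(n*k) instead of O(n+E).
import Mathlib
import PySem

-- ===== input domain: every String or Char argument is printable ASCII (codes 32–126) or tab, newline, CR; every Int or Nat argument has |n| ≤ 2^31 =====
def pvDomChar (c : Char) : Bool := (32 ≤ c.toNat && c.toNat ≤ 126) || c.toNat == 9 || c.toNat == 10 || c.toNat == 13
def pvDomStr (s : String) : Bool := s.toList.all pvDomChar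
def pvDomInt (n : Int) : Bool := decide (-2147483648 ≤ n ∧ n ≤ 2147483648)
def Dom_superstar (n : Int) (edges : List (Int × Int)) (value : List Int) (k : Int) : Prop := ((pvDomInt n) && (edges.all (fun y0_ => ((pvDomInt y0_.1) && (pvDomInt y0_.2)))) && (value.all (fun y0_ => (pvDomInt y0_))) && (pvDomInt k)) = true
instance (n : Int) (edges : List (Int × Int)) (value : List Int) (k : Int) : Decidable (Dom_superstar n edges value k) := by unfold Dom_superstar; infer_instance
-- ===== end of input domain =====

-- B keeps, per node, only a size-capped ascending buffer of the k largest positive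
-- neighbour values, maintained online in the single edge pass (no full adjacency
-- lists, no per-node selection afterwards); objective: alternative decomposition.
-- A mutates nothing observable; equivalence is about the return value.

-- ===== PORT A =====
-- loop body of A's 'for u, v in edges' (g[u].append(value[v]) / g[v].append(value[u]))
def superstarStepA (value : List Int) (g : List (List Int)) (p : Int × Int) : List (List Int) :=
  let g1 := if 0 < PySem.List.pyGetD value p.2 0 then
      PySem.List.pySetD g p.1 (PySem.List.pyGetD g p.1 [] ++ [PySem.List.pyGetD value p.2 0])
    else g
  if 0 < PySem.List.pyGetD value p.1 0 then
      PySem.List.pySetD g1 p.2 (PySem.List.pyGetD g1 p.2 [] ++ [PySem.List.pyGetD value p.1 0])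
  else g1

def superstar (n : Int) (edges : List (Int × Int)) (value : List Int) (k : Int) : Int :=
  let g0 : List (List Int) := (PySem.List.pyRange 0 n 1).map (fun _ => ([] : List Int))
  let g := edges.foldl (superstarStepA value) g0
  -- max(value[i] + sum(nlargest(k, g[i])) for i in range(n)); nlargest = sorted desc, first k
  (PySem.List.max?
      ((PySem.List.pyRange 0 n 1).map (fun i =>
        PySem.List.pyGetD value i 0 +
          ((PySem.List.sorted (PySem.List.pyGetD g i []) (fun x => x) true).take k.toNat).sum))
      (fun x => x)).getD 0

-- ===== PORT B =====
-- t.insert(i, w) after the scan 'while i < len(t) and t[i] <= w: i += 1'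
def insAsc (w : Int) : List Int → List Int
  | [] => [w]
  | y :: ys => if y ≤ w then y :: insAsc w ys else w :: y :: ys

-- body of B's inner update: insert, then 'if len(t) > k: t.pop(0)'
def capStep (k : Int) (t : List Int) (w : Int) : List Int :=
  let t' := insAsc w t
  if (t'.length : Int) > k then t'.tail else t'

-- loop body of B's 'for u, v in edges' ('for a, b in ((u, v), (v, u))')
def superstarStepB (value : List Int) (k : Int) (top : List (List Int)) (p : Int × Int) : List (List Int) :=
  [(p.1, p.2), (p.2, p.1)].foldl (fun top ab =>
    let w := PySem.List.pyGetD value ab.2 0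
    if 0 < w ∧ 0 < k then
      PySem.List.pySetD top ab.1 (capStep k (PySem.List.pyGetD top ab.1 []) w)
    else top) top

def superstar_alt (n : Int) (edges : List (Int × Int)) (value : List Int) (k : Int) : Int :=
  let top0 : List (List Int) := (PySem.List.pyRange 0 n 1).map (fun _ => ([] : List Int))
  let top := edges.foldl (superstarStepB value k) top0
  let best := (PySem.List.pyRange 0 n 1).foldl (fun best i =>
    let s := PySem.List.pyGetD value i 0 + (PySem.List.pyGetD top i []).sum
    match best with
    | none => some s
    | some b => if b < s then some s else some b) (none : Option Int)
  best.getD 0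

-- ===== PRECONDITION & SPEC =====
-- Pre_ = exactly the inputs where Python A raises nothing: 1 ≤ n ≤ len(value) (else the
-- final max/indexing raises) and, per edge (u,v): value[v] in range, g[u] in range when
-- value[v] > 0, value[u] in range, g[v] in range when value[u] > 0.
def Pre_superstar (n : Int) (edges : List (Int × Int)) (value : List Int) (k : Int) : Prop :=
  -- (k is unconstrained: heapq.nlargest accepts any k)
  1 ≤ n ∧ n ≤ (value.length : Int) ∧
  ∀ p ∈ edges,
    PySem.Raise.InRange value.length p.2 ∧
    (0 < PySem.List.pyGetD value p.2 0 → PySem.Raise.InRange n.toNat p.1) ∧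
    PySem.Raise.InRange value.length p.1 ∧
    (0 < PySem.List.pyGetD value p.1 0 → PySem.Raise.InRange n.toNat p.2)
instance (n : Int) (edges : List (Int × Int)) (value : List Int) (k : Int) : Decidable (Pre_superstar n edges value k) := by unfold Pre_superstar; infer_instance

def pvWitness_superstar : Int × (List (Int × Int)) × List Int × Int := (2, [(0, 1)], [1, 2], 1)

def Spec_superstar (n : Int) (edges : List (Int × Int)) (value : List Int) (k : Int) (out : Int) : Prop := out = superstar_alt n edges value k
instance (n : Int) (edges : List (Int × Int)) (value : List Int) (k : Int) (out : Int) : Decidable (Spec_superstar n edges value k out) := by unfold Spec_superstar; infer_instance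

-- ===== CLAIM (what is proved, stated in full; the proofs are below) =====
def Claim_equal_superstar : Prop := ∀ (n : Int) (edges : List (Int × Int)) (value : List Int) (k : Int), Dom_superstar n edges value k → Pre_superstar n edges value k → Spec_superstar n edges value k (superstar n edges value k)

-- ===== LEMMAS AND PROOFS =====

theorem length_insAsc (w : Int) (s : List Int) : (insAsc w s).length = s.length + 1 := by
  induction s with
  | nil => simp [insAsc]
  | cons y ys ih =>
    simp only [insAsc]
    by_cases h : y ≤ w <;> simp [h, ih]

theorem insertBy_eq_insAsc (w : Int) (s : List Int) :
    PySem.List.insertBy (fun a b => decide (a < b)) w s = insAsc w s := by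
  induction s with
  | nil => rfl
  | cons y ys ih =>
    simp only [PySem.List.insertBy, insAsc]
    by_cases h : y ≤ w
    · have : ¬ w < y := not_lt.mpr h
      simp [h, this, ih]
    · have : w < y := not_le.mp h
      simp [h, this]

-- sorted ascending with identity key (Python sorted(l))
def isort (l : List Int) : List Int := PySem.List.sorted l (fun x => x) false

-- the last min(len, k.toNat) elements
def lastK (k : Int) (s : List Int) : List Int := s.drop (s.length - k.toNat)

theorem isort_append_singleton (l : List Int) (w : Int) :
    isort (l ++ [w]) = insAsc w (isort l) := by
  simp [isort, PySem.List.sorted, List.foldl_append, insertBy_eq_insAsc]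

theorem isort_pairwise (l : List Int) : (isort l).Pairwise (· ≤ ·) :=
  PySem.List.sorted_pairwise l (fun x => x)

theorem insAsc_head_gt (w : Int) (ys : List Int) (hw : ∀ z ∈ ys, ¬ z ≤ w) :
    insAsc w ys = w :: ys := by
  cases ys with
  | nil => rfl
  | cons z zs => simp [insAsc, hw z (by simp)]

theorem insAsc_drop_succ (w : Int) (s : List Int) (hp : s.Pairwise (· ≤ ·)) (m : Nat) :
    (insAsc w s).drop (m + 1) = (insAsc w (s.drop m)).tail := by
  induction s generalizing m with
  | nil => simp [insAsc]
  | cons y ys ih =>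
    rcases List.pairwise_cons.mp hp with ⟨hy, hys⟩
    cases m with
    | zero => simp [List.drop_one]
    | succ m' =>
      simp only [List.drop_succ_cons]
      rw [← ih hys m']
      by_cases h : y ≤ w
      · simp [insAsc, h]
      · have hw : ∀ z ∈ ys, ¬ z ≤ w := fun z hz => by have := hy z hz; omega
        simp [insAsc, h, insAsc_head_gt w ys hw]

theorem capStep_lastK (k : Int) (hk : 0 < k) (w : Int) (s : List Int)
    (hs : s.Pairwise (· ≤ ·)) : capStep k (lastK k s) w = lastK k (insAsc w s) := by
  have hkk : ((k.toNat : Int)) = k := by omega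
  by_cases hlen : s.length < k.toNat
  · have h0 : s.length - k.toNat = 0 := by omega
    have h1 : (insAsc w s).length - k.toNat = 0 := by rw [length_insAsc]; omega
    have hnot : ¬ (((insAsc w s).length : Int) > k) := by
      rw [length_insAsc]; push_cast; omega
    simp [lastK, capStep, h0, h1, hnot]
  · have hgt : (((insAsc w (lastK k s)).length : Int) > k) := by
      rw [length_insAsc]
      simp only [lastK, List.length_drop]
      push_cast
      omega
    have harith : (insAsc w s).length - k.toNat = (s.length - k.toNat) + 1 := by
      rw [length_insAsc]; omega
    simp only [capStep, hgt, if_true]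
    rw [show lastK k (insAsc w s) = (insAsc w s).drop ((s.length - k.toNat) + 1) by
          simp only [lastK, harith],
        insAsc_drop_succ w s hs]
    rfl

theorem foldl_capStep_eq_lastK (k : Int) (hk : 0 < k) (l : List Int) :
    l.foldl (capStep k) [] = lastK k (isort l) := by
  induction l using List.reverseRecOn with
  | nil => simp [isort, PySem.List.sorted, lastK]
  | append_singleton l w ih =>
    rw [List.foldl_append, List.foldl_cons, List.foldl_nil, ih,
      capStep_lastK k hk w _ (isort_pairwise l), isort_append_singleton]

theorem foldl_capStep_nil_of_nonpos (k : Int) (hk : ¬ 0 < k) (l : List Int) :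
    l.foldl (capStep k) [] = [] := by
  induction l with
  | nil => rfl
  | cons w l ih =>
    have h1 : capStep k [] w = [] := by
      simp only [capStep, insAsc]
      have : ((1 : Int) > k) := by omega
      simp [this]
    rw [List.foldl_cons, h1, ih]

theorem sorted_rev_eq_reverse (l : List Int) :
    PySem.List.sorted l (fun x => x) true = (isort l).reverse := by
  apply List.eq_of_perm_of_sorted (le := fun a b : Int => b ≤ a)
  · intro a b _ _ h1 h2; omega
  · exact PySem.List.sorted_pairwise_rev l (fun x => x)
  · exact List.pairwise_reverse.mpr (by simpa using isort_pairwise l)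
  · exact ((PySem.List.sorted_perm l (fun x => x) true).trans
      ((PySem.List.sorted_perm l (fun x => x) false).symm.trans (List.reverse_perm _).symm))

theorem sum_capStep_eq_sum_nlargest (k : Int) (l : List Int) :
    (l.foldl (capStep k) []).sum =
      ((PySem.List.sorted l (fun x => x) true).take k.toNat).sum := by
  by_cases hk : 0 < k
  · rw [foldl_capStep_eq_lastK k hk, sorted_rev_eq_reverse, List.take_reverse,
      List.sum_reverse]
    have : (isort l).length = l.length := (PySem.List.sorted_perm _ _ _).length_eq
    simp [lastK]
  · have hk0 : k.toNat = 0 := by omega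
    rw [foldl_capStep_nil_of_nonpos k hk, hk0]
    simp

theorem pyIdx?_lt (n : Nat) (i : Int) (j : Nat) (h : PySem.List.pyIdx? n i = some j) : j < n := by
  simp only [PySem.List.pyIdx?] at h
  split at h <;> split at h <;> simp_all <;> omega

theorem pyGetD_pySetD_general {α : Type} (xs : List α) (u i : Int) (v d : α) :
    PySem.List.pyGetD (PySem.List.pySetD xs u v) i d =
      match PySem.List.pyIdx? xs.length u with
      | none => PySem.List.pyGetD xs i d
      | some j => if PySem.List.pyIdx? xs.length i = some j then v
                  else PySem.List.pyGetD xs i d := by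
  cases hu : PySem.List.pyIdx? xs.length u with
  | none => simp [PySem.List.pySetD, PySem.List.pySet?, hu]
  | some j =>
    have hj := pyIdx?_lt xs.length u j hu
    simp only [PySem.List.pySetD, PySem.List.pySet?, hu, Option.map_some, Option.getD_some]
    cases hi : PySem.List.pyIdx? xs.length i with
    | none =>
      simp [PySem.List.pyGetD, PySem.List.pyGet?, List.length_set, hi]
    | some j' =>
      simp only [PySem.List.pyGetD, PySem.List.pyGet?, List.length_set, hi, Option.bind_some]
      rcases eq_or_ne j' j with rfl | hne
      · simp [hj]
      · simp [hne.symm, hne]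

theorem pyGetD_eq_of_pyIdx?_eq {α : Type} (xs : List α) (u i : Int) (d : α)
    (h : PySem.List.pyIdx? xs.length u = PySem.List.pyIdx? xs.length i) :
    PySem.List.pyGetD xs u d = PySem.List.pyGetD xs i d := by
  simp [PySem.List.pyGetD, PySem.List.pyGet?, h]

-- the relation maintained between A's adjacency table and B's top-k buffers
def TopInv (k : Int) (g t : List (List Int)) : Prop :=
  g.length = t.length ∧
  ∀ i : Int, PySem.List.pyGetD t i [] = (PySem.List.pyGetD g i []).foldl (capStep k) []

theorem half_step (k : Int) (value : List Int) (g t : List (List Int)) (a b : Int)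
    (h : TopInv k g t) :
    TopInv k
      (if 0 < PySem.List.pyGetD value b 0 then
        PySem.List.pySetD g a (PySem.List.pyGetD g a [] ++ [PySem.List.pyGetD value b 0]) else g)
      (if 0 < PySem.List.pyGetD value b 0 ∧ 0 < k then
        PySem.List.pySetD t a (capStep k (PySem.List.pyGetD t a []) (PySem.List.pyGetD value b 0))
       else t) := by
  obtain ⟨hlen, hinv⟩ := h
  set w := PySem.List.pyGetD value b 0 with hw
  by_cases hwpos : 0 < w
  · by_cases hk : 0 < k
    · simp only [hwpos, hk, and_self, if_true]
      refine ⟨by simp [PySem.List.length_pySetD, hlen], ?_⟩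
      intro i
      rw [pyGetD_pySetD_general, pyGetD_pySetD_general, hlen]
      cases ha : PySem.List.pyIdx? t.length a with
      | none => exact hinv i
      | some j =>
        by_cases hi : PySem.List.pyIdx? t.length i = some j
        · simp only [hi, if_true]
          have hga : PySem.List.pyGetD g a [] = PySem.List.pyGetD g i [] := by
            apply pyGetD_eq_of_pyIdx?_eq; rw [hlen, ha, hi]
          rw [hinv a, hga, List.foldl_append, List.foldl_cons, List.foldl_nil]
        · simp only [hi, if_false]
          exact hinv i
    · simp only [hwpos, hk, and_false, if_true, if_false]
      refine ⟨by simp [PySem.List.length_pySetD, hlen], ?_⟩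
      intro i
      rw [pyGetD_pySetD_general, hlen]
      cases ha : PySem.List.pyIdx? t.length a with
      | none => exact hinv i
      | some j =>
        by_cases hi : PySem.List.pyIdx? t.length i = some j
        · simp only [hi, if_true]
          rw [hinv i, foldl_capStep_nil_of_nonpos k hk, foldl_capStep_nil_of_nonpos k hk]
        · simp only [hi, if_false]
          exact hinv i
  · simp only [hwpos, false_and, if_false]
    exact ⟨hlen, hinv⟩

theorem step_inv (k : Int) (value : List Int) (g t : List (List Int)) (p : Int × Int)
    (h : TopInv k g t) :
    TopInv k (superstarStepA value g p) (superstarStepB value k t p) := by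
  have h1 := half_step k value g t p.1 p.2 h
  have h2 := half_step k value _ _ p.2 p.1 h1
  simpa [superstarStepA, superstarStepB] using h2

theorem fold_inv (k : Int) (value : List Int) (edges : List (Int × Int))
    (g t : List (List Int)) (h : TopInv k g t) :
    TopInv k (edges.foldl (superstarStepA value) g) (edges.foldl (superstarStepB value k) t) := by
  induction edges generalizing g t with
  | nil => exact h
  | cons p es ih => exact ih _ _ (step_inv k value g t p h)

theorem init_inv (n k : Int) :
    TopInv k ((PySem.List.pyRange 0 n 1).map (fun _ => ([] : List Int)))
             ((PySem.List.pyRange 0 n 1).map (fun _ => ([] : List Int))) := by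
  refine ⟨rfl, ?_⟩
  intro i
  have hnil : PySem.List.pyGetD ((PySem.List.pyRange 0 n 1).map (fun _ => ([] : List Int))) i
      ([] : List Int) = [] := by
    simp only [PySem.List.pyGetD]
    cases hx : PySem.List.pyGet? ((PySem.List.pyRange 0 n 1).map (fun _ => ([] : List Int))) i with
    | none => rfl
    | some x =>
      have := PySem.List.mem_of_pyGet?_eq_some _ hx
      simp only [List.mem_map] at this
      obtain ⟨_, _, rfl⟩ := this
      rfl
  rw [hnil]
  rfl

theorem foldl_congr_fun {α β : Type} (f g : β → α → β)
    (h : ∀ (b : β) (a : α), f b a = g b a) (init : β) (l : List α) :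
    l.foldl f init = l.foldl g init := by
  have hfg : f = g := funext fun b => funext fun a => h b a
  rw [hfg]

theorem superstar_eq_alt (n : Int) (edges : List (Int × Int)) (value : List Int) (k : Int) :
    superstar n edges value k = superstar_alt n edges value k := by
  unfold superstar superstar_alt
  obtain ⟨-, hinv⟩ := fold_inv k value edges _ _ (init_inv n k)
  have key : ∀ i : Int,
      PySem.List.pyGetD value i 0 +
        ((PySem.List.sorted
            (PySem.List.pyGetD
              (edges.foldl (superstarStepA value)
                ((PySem.List.pyRange 0 n 1).map (fun _ => ([] : List Int)))) i [])
            (fun x => x) true).take k.toNat).sum =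
      PySem.List.pyGetD value i 0 +
        (PySem.List.pyGetD
          (edges.foldl (superstarStepB value k)
            ((PySem.List.pyRange 0 n 1).map (fun _ => ([] : List Int)))) i []).sum := by
    intro i
    rw [hinv i, sum_capStep_eq_sum_nlargest]
  simp only [PySem.List.max?, List.foldl_map]
  congr 1
  apply foldl_congr_fun
  intro b a
  cases b <;> rw [key a]

-- ===== VERDICT (by name: the statement is the Claim_ definition above) =====
theorem superstar_spec : Claim_equal_superstar := by
  intro n edges value k _ _
  show _ = _
  exact superstar_eq_alt n edges value k
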